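-- pv_equiv track=rewrite | github.com/dgsim126/Algo_Study_2 | Programmers/심동근/2504/250409/외로운 문자.py | solution
-- ===== SOURCE A (Python) =====
-- def solution(word):
--     dic= {}
--
--     for i in range(len(word)):
--         if(word[i] not in dic):
--             dic[word[i]]= 1
--         else:
--             dic[word[i]]+=1
--
--     result= []
--
--     for key, value in dic.items():
--         if(value%2!=0):
--             result.append(key)
--
--     if(len(result)==0):
--         return "Good"
--
--     return "".join(sorted(result))
-- ===== SOURCE B (Python) =====
-- def solution(word):
--     odd = set()
--     for c in word:
--         if c in odd:
--             odd.discard(c)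
--         else:
--             odd.add(c)
--     if not odd:
--         return "Good"
--     return "".join(sorted(odd))
-- ===== Notes on version B (the rewrite author's own statement) =====
-- stated objective: idiomatic
-- what changed: Replaces the count-dict plus separate odd-filter pass with a single parity-toggling set: each character flips its membership in `odd`, which after one pass holds exactly the odd-count characters.
import Mathlib
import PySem

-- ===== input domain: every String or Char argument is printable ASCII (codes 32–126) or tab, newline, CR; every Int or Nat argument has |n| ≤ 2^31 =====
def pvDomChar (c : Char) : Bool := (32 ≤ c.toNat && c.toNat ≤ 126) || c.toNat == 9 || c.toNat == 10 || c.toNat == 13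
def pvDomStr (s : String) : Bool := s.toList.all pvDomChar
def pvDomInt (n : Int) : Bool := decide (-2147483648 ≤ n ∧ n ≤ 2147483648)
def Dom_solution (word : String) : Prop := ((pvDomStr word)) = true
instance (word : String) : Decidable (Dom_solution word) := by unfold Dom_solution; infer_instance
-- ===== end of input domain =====

-- B replaces A's count-dict + odd-filter pass with one parity-toggling set (idiomatic, not faster).

-- ===== PORT A =====
-- `for i in range(len(word)): … word[i] …` visits exactly the characters of word in order:
-- ported as a fold over word.toList.
def solution (word : String) : String :=
  let dic : PySem.Dict Char Int :=
    word.toList.foldl (fun d c =>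
      match PySem.Dict.get? d c with
      | none => PySem.Dict.insert d c 1
      | some v => PySem.Dict.insert d c (v + 1)) PySem.Dict.empty
  let result : List Char :=
    (PySem.Dict.items dic).foldl
      (fun r kv => if PySem.Int.mod kv.2 2 ≠ 0 then r ++ [kv.1] else r) []
  if result.length = 0 then "Good"
  else String.ofList (PySem.List.sorted result (fun c => c) false)

-- ===== PORT B =====
def solution_alt (word : String) : String :=
  let odd : PySem.Set Char :=
    word.toList.foldl (fun s c =>
      if c ∈ s then PySem.Set.discard s c else PySem.Set.add s c) PySem.Set.empty
  if odd = [] then "Good"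
  else String.ofList (PySem.List.sorted odd (fun c => c) false)

-- ===== PRECONDITION & SPEC =====
def Spec_solution (word : String) (out : String) : Prop := out = solution_alt word
instance (word : String) (out : String) : Decidable (Spec_solution word out) := by unfold Spec_solution; infer_instance

-- ===== CLAIM (what is proved, stated in full; the proofs are below) =====
def Claim_equal_solution : Prop := ∀ (word : String), Dom_solution word → Spec_solution word (solution word)

-- ===== LEMMAS AND PROOFS =====

-- A's count step equals the insert-getD counting step (when absent, getD gives 0).
theorem pvStepA_eq (d : PySem.Dict Char Int) (c : Char) :
    (match PySem.Dict.get? d c with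
     | none => PySem.Dict.insert d c 1
     | some v => PySem.Dict.insert d c (v + 1))
      = PySem.Dict.insert d c (PySem.Dict.getD d c 0 + 1) := by
  cases h : PySem.Dict.get? d c with
  | none => simp [PySem.Dict.getD_eq_get?_getD, h]
  | some v => simp [PySem.Dict.getD_eq_get?_getD, h]

-- B's toggle loop: the state stays Nodup and membership is "initial membership XOR odd count".
theorem pvToggle_inv (l : List Char) (s : List Char) (hs : s.Nodup) :
    (l.foldl (fun s c => if c ∈ s then PySem.Set.discard s c else PySem.Set.add s c) s).Nodup ∧
    ∀ c, c ∈ l.foldl (fun s c => if c ∈ s then PySem.Set.discard s c else PySem.Set.add s c) s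
        ↔ ((c ∈ s) ↔ l.count c % 2 = 0) := by
  induction l generalizing s with
  | nil =>
    refine ⟨hs, fun c => ?_⟩
    simp
  | cons x t ih =>
    simp only [List.foldl_cons]
    by_cases hx : x ∈ s
    · have hnd : (PySem.Set.discard s x).Nodup := PySem.Set.nodup_discard _ _ hs
      obtain ⟨h1, h2⟩ := ih _ hnd
      refine ⟨by simpa [hx] using h1, fun c => ?_⟩
      rw [if_pos hx, h2 c, PySem.Set.mem_discard]
      by_cases hc : c = x
      · subst hc
        simp [hx, List.count_cons_self, Nat.add_mod]
        omega
      · simp [hc, List.count_cons_of_ne (fun h => hc h.symm)]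
    · have hnd : (PySem.Set.add s x).Nodup := PySem.Set.nodup_add _ _ hs
      obtain ⟨h1, h2⟩ := ih _ hnd
      refine ⟨by simpa [hx] using h1, fun c => ?_⟩
      rw [if_neg hx, h2 c, PySem.Set.mem_add]
      by_cases hc : c = x
      · subst hc
        simp [hx, List.count_cons_self, Nat.add_mod]
        omega
      · simp [hc, List.count_cons_of_ne (fun h => hc h.symm)]

-- A's `result` list is the (nodup) first-occurrence list of the odd-count characters.
theorem pvResultA_char (l : List Char) :
    ((PySem.Dict.items
        (l.foldl (fun (d : PySem.Dict Char Int) c =>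
          match PySem.Dict.get? d c with
          | none => PySem.Dict.insert d c 1
          | some v => PySem.Dict.insert d c (v + 1)) PySem.Dict.empty)).foldl
      (fun r kv => if PySem.Int.mod kv.2 2 ≠ 0 then r ++ [kv.1] else r) [])
    = ((PySem.Set.ofList l).filter
        (fun c => decide (PySem.Int.mod (l.count c : Int) 2 ≠ 0))) := by
  have hstep : (fun (d : PySem.Dict Char Int) c =>
      match PySem.Dict.get? d c with
      | none => PySem.Dict.insert d c 1
      | some v => PySem.Dict.insert d c (v + 1))
      = (fun (d : PySem.Dict Char Int) c => PySem.Dict.insert d c (PySem.Dict.getD d c 0 + 1)) := by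
    funext d c; exact pvStepA_eq d c
  rw [hstep, PySem.Dict.foldl_insert_getD_add_one_eq_counter,
      PySem.List.foldl_append_ite, PySem.Dict.items_counter]
  simp [List.filter_map, Function.comp_def]

theorem pvOddCount_iff (n : Nat) :
    (PySem.Int.mod (n : Int) 2 ≠ 0) ↔ ¬ (n % 2 = 0) := by
  rw [PySem.Int.mod_eq_emod_of_pos (by norm_num)]
  omega

-- The two character lists are permutations of each other.
theorem pvPerm (l : List Char) :
    ((PySem.Set.ofList l).filter
        (fun c => decide (PySem.Int.mod (l.count c : Int) 2 ≠ 0))).Perm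
      (l.foldl (fun s c => if c ∈ s then PySem.Set.discard s c else PySem.Set.add s c)
        PySem.Set.empty) := by
  obtain ⟨hnd, hmem⟩ := pvToggle_inv l PySem.Set.empty (by simp [PySem.Set.empty])
  rw [List.perm_ext_iff_of_nodup (List.Nodup.filter _ (PySem.Set.nodup_ofList l)) hnd]
  intro c
  rw [hmem c, List.mem_filter, PySem.Set.mem_ofList]
  simp only [PySem.Set.empty, List.not_mem_nil, false_iff, decide_eq_true_eq,
    pvOddCount_iff]
  constructor
  · rintro ⟨-, h⟩; exact h
  · intro h
    have hc : c ∈ l := by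
      by_contra hc
      exact h (by simp [List.count_eq_zero_of_not_mem hc])
    exact ⟨hc, h⟩

theorem pvMain (word : String) : solution word = solution_alt word := by
  unfold solution solution_alt
  dsimp only
  rw [pvResultA_char]
  have hp := pvPerm word.toList
  have hsort := PySem.List.sorted_eq_sorted_of_perm _ _ (fun c : Char => c)
    (fun a b h => h) hp
  have hlen : (((PySem.Set.ofList word.toList).filter
      (fun c => decide (PySem.Int.mod ((word.toList.count c : Nat) : Int) 2 ≠ 0))).length = 0)
      ↔ ((word.toList.foldl (fun s c =>
          if c ∈ s then PySem.Set.discard s c else PySem.Set.add s c)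
          PySem.Set.empty) = []) := by
    rw [List.length_eq_zero_iff]
    exact ⟨fun h => ((h ▸ hp).symm).eq_nil, fun h => (h ▸ hp.symm).symm.eq_nil⟩
  by_cases h : ((word.toList.foldl (fun s c =>
      if c ∈ s then PySem.Set.discard s c else PySem.Set.add s c) PySem.Set.empty) = [])
  · rw [if_pos (hlen.mpr h), if_pos h]
  · rw [if_neg (fun hh => h (hlen.mp hh)), if_neg h, hsort]

-- ===== VERDICT (by name: the statement is the Claim_ definition above) =====
theorem solution_spec : Claim_equal_solution := by
  intro word _
  unfold Spec_solution
  exact pvMain word
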